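-- pv_equiv track=rewrite | github.com/steverydz/adventofcode2024 | day-02/part-1/main.py | get_safe_reports
-- ===== SOURCE A (Python) =====
-- def is_increasing(report):
--     levels = []
--
--     for level in report:
--         if levels and level <= levels[-1]:
--             return False
--
--         levels.append(level)
--
--     return True
--
-- def is_safe_increasing(report):
--     if not is_increasing(report):
--         return False
--
--     levels = []
--
--     for level in report:
--         if levels:
--             prev = levels[-1]
--
--             if level - prev < 1:
--                 return False
--
--             if level - prev > 3:
--                 return False
--
--         levels.append(level)
--
--     return True
--
-- def is_decreasing(report):
--     levels = []
--
--     for level in report: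
--         if levels and level >= levels[-1]:
--             return False
--
--         levels.append(level)
--
--     return True
--
-- def is_safe_decreasing(report):
--     if not is_decreasing(report):
--         return False
--
--     levels = []
--
--     for level in report:
--         if levels:
--             prev = levels[-1]
--
--             if prev - level < 1:
--                 return False
--
--             if prev - level > 3:
--                 return False
--
--         levels.append(level)
--
--     return True
--
-- def get_safe_reports(reports):
--     safe_increasing_reports = []
--     safe_decreasing_reports = []
--
--     for report in reports:
--         if is_safe_increasing(report):
--             safe_increasing_reports.append(report)
--
--         if is_safe_decreasing(report):
--             safe_decreasing_reports.append(report)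
--
--     return safe_increasing_reports + safe_decreasing_reports
-- ===== SOURCE B (Python) =====
-- def get_safe_reports(reports):
--     increasing = []
--     decreasing = []
--
--     for report in reports:
--         diffs = [b - a for a, b in zip(report, report[1:])]
--
--         if not diffs:
--             increasing.append(report)
--             decreasing.append(report)
--             continue
--
--         lo, hi = min(diffs), max(diffs)
--
--         if 1 <= lo and hi <= 3:
--             increasing.append(report)
--
--         if -3 <= lo and hi <= -1:
--             decreasing.append(report)
--
--     return increasing + decreasing
-- ===== Notes on version B (the rewrite author's own statement) =====
-- stated objective: alternative
-- what changed: Instead of A's four short-circuiting per-report scans (separate monotonicity pass plus step-size pass per direction), B computes the adjacent-difference list once per report, reduces it to its min and max, and classifies both directions by range tests on those two extrema (empty diff list means both directions safe).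
import Mathlib
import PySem

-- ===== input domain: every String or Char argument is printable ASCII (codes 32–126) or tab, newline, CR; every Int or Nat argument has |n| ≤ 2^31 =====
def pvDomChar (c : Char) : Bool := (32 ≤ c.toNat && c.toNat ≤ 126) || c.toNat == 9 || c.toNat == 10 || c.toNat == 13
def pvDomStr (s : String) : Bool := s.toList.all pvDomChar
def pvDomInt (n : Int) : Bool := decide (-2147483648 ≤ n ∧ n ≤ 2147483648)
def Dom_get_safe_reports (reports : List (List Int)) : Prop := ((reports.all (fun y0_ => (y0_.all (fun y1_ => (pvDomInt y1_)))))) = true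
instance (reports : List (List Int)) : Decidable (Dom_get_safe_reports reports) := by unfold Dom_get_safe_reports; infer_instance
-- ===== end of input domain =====

-- B replaces A's four short-circuiting per-report scans with one diff list per report reduced to its min/max extrema; objective: alternative.

-- ===== PORT A =====
def pvIncGo : List Int → List Int → Bool
  | _, [] => true
  | levels, level :: rest =>
    if !levels.isEmpty && level ≤ levels.getLast?.getD 0 then false
    else pvIncGo (levels ++ [level]) rest

def is_increasing (report : List Int) : Bool := pvIncGo [] report

def pvSafeIncGo : List Int → List Int → Bool
  | _, [] => true
  | levels, level :: rest =>
    if levels.isEmpty then pvSafeIncGo (levels ++ [level]) rest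
    else
      let prev := levels.getLast?.getD 0
      if level - prev < 1 then false
      else if level - prev > 3 then false
      else pvSafeIncGo (levels ++ [level]) rest

def is_safe_increasing (report : List Int) : Bool :=
  if !is_increasing report then false else pvSafeIncGo [] report

def pvDecGo : List Int → List Int → Bool
  | _, [] => true
  | levels, level :: rest =>
    if !levels.isEmpty && level ≥ levels.getLast?.getD 0 then false
    else pvDecGo (levels ++ [level]) rest

def is_decreasing (report : List Int) : Bool := pvDecGo [] report

def pvSafeDecGo : List Int → List Int → Bool
  | _, [] => true
  | levels, level :: rest =>
    if levels.isEmpty then pvSafeDecGo (levels ++ [level]) rest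
    else
      let prev := levels.getLast?.getD 0
      if prev - level < 1 then false
      else if prev - level > 3 then false
      else pvSafeDecGo (levels ++ [level]) rest

def is_safe_decreasing (report : List Int) : Bool :=
  if !is_decreasing report then false else pvSafeDecGo [] report

def get_safe_reports (reports : List (List Int)) : List (List Int) :=
  let p := reports.foldl
    (fun (acc : List (List Int) × List (List Int)) report =>
      let acc := if is_safe_increasing report then (acc.1 ++ [report], acc.2) else acc
      if is_safe_decreasing report then (acc.1, acc.2 ++ [report]) else acc)
    ([], [])
  p.1 ++ p.2

-- ===== PORT B =====
-- diffs = [b - a for a, b in zip(report, report[1:])]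
def pvDiffs (r : List Int) : List Int :=
  List.zipWith (fun a b => b - a) r (r.drop 1)

def get_safe_reports_alt (reports : List (List Int)) : List (List Int) :=
  let p := reports.foldl
    (fun (acc : List (List Int) × List (List Int)) report =>
      match pvDiffs report with
      | [] => (acc.1 ++ [report], acc.2 ++ [report])
      | d :: ds =>
        let lo := ds.foldl min d
        let hi := ds.foldl max d
        let acc := if 1 ≤ lo ∧ hi ≤ 3 then (acc.1 ++ [report], acc.2) else acc
        if -3 ≤ lo ∧ hi ≤ -1 then (acc.1, acc.2 ++ [report]) else acc)
    ([], [])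
  p.1 ++ p.2

-- ===== PRECONDITION & SPEC =====
def Spec_get_safe_reports (reports : List (List Int)) (out : List (List Int)) : Prop := out = get_safe_reports_alt reports
instance (reports : List (List Int)) (out : List (List Int)) : Decidable (Spec_get_safe_reports reports out) := by unfold Spec_get_safe_reports; infer_instance

-- ===== CLAIM =====
def Claim_equal_get_safe_reports : Prop := ∀ (reports : List (List Int)), Dom_get_safe_reports reports → Spec_get_safe_reports reports (get_safe_reports reports)

-- ===== LEMMAS AND PROOFS =====

-- per-report classifier functions extracted from the two folds
def condIncB (r : List Int) : Bool :=
  match pvDiffs r with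
  | [] => true
  | d :: ds => decide (1 ≤ ds.foldl min d ∧ ds.foldl max d ≤ 3)

def condDecB (r : List Int) : Bool :=
  match pvDiffs r with
  | [] => true
  | d :: ds => decide (-3 ≤ ds.foldl min d ∧ ds.foldl max d ≤ -1)

-- chain forms of A's four loops, anchored on the previous level only
def chainInc : Int → List Int → Bool
  | _, [] => true
  | p, l :: rest => if l ≤ p then false else chainInc l rest

def chainSafeInc : Int → List Int → Bool
  | _, [] => true
  | p, l :: rest => if l - p < 1 then false else if l - p > 3 then false else chainSafeInc l rest

def chainDec : Int → List Int → Bool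
  | _, [] => true
  | p, l :: rest => if l ≥ p then false else chainDec l rest

def chainSafeDec : Int → List Int → Bool
  | _, [] => true
  | p, l :: rest => if p - l < 1 then false else if p - l > 3 then false else chainSafeDec l rest

theorem pvIncGo_concat (rest : List Int) : ∀ levels p, pvIncGo (levels ++ [p]) rest = chainInc p rest := by
  induction rest with
  | nil => intro levels p; rfl
  | cons l rest ih =>
    intro levels p
    simp only [pvIncGo, chainInc, List.getLast?_concat]
    by_cases h : l ≤ p
    · simp [h]
    · simpa [h] using ih (levels ++ [p]) l

theorem pvSafeIncGo_concat (rest : List Int) : ∀ levels p, pvSafeIncGo (levels ++ [p]) rest = chainSafeInc p rest := by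
  induction rest with
  | nil => intro levels p; rfl
  | cons l rest ih =>
    intro levels p
    simp only [pvSafeIncGo, chainSafeInc, List.getLast?_concat]
    have hne : ((levels ++ [p]).isEmpty) = false := by simp
    rw [hne]
    simp only [Option.getD_some, Bool.false_eq_true, if_false]
    split_ifs with h1 h2
    · rfl
    · rfl
    · exact ih (levels ++ [p]) l

theorem pvDecGo_concat (rest : List Int) : ∀ levels p, pvDecGo (levels ++ [p]) rest = chainDec p rest := by
  induction rest with
  | nil => intro levels p; rfl
  | cons l rest ih =>
    intro levels p
    simp only [pvDecGo, chainDec, List.getLast?_concat]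
    by_cases h : l ≥ p
    · simp [h]
    · simpa [h] using ih (levels ++ [p]) l

theorem pvSafeDecGo_concat (rest : List Int) : ∀ levels p, pvSafeDecGo (levels ++ [p]) rest = chainSafeDec p rest := by
  induction rest with
  | nil => intro levels p; rfl
  | cons l rest ih =>
    intro levels p
    simp only [pvSafeDecGo, chainSafeDec, List.getLast?_concat]
    have hne : ((levels ++ [p]).isEmpty) = false := by simp
    rw [hne]
    simp only [Option.getD_some, Bool.false_eq_true, if_false]
    split_ifs with h1 h2
    · rfl
    · rfl
    · exact ih (levels ++ [p]) l

-- combined chain = "every adjacent difference lies in the range", chained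
def chainBothInc : Int → List Int → Bool
  | _, [] => true
  | p, l :: rest => ((1 ≤ l - p) && (l - p ≤ 3)) && chainBothInc l rest

def chainBothDec : Int → List Int → Bool
  | _, [] => true
  | p, l :: rest => ((1 ≤ p - l) && (p - l ≤ 3)) && chainBothDec l rest

theorem chain_both_inc (t : List Int) : ∀ p, (chainInc p t && chainSafeInc p t) = chainBothInc p t := by
  induction t with
  | nil => intro p; rfl
  | cons l t ih =>
    intro p
    simp only [chainInc, chainSafeInc, chainBothInc]
    by_cases h : l ≤ p
    · have h1 : l - p < 1 := by omega
      simp [h, h1, show ¬ (1 : Int) ≤ l - p by omega]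
    · have h1 : ¬ l - p < 1 := by omega
      by_cases h2 : l - p > 3
      · simp [h, h1, h2, show ¬ (l - p ≤ 3) by omega]
      · simp only [if_neg h, if_neg h1, if_neg h2]
        rw [ih l]
        have : ((1 : Int) ≤ l - p) = True := by simp; omega
        have h3 : ((l - p : Int) ≤ 3) = True := by simp; omega
        simp [this, h3]

theorem chain_both_dec (t : List Int) : ∀ p, (chainDec p t && chainSafeDec p t) = chainBothDec p t := by
  induction t with
  | nil => intro p; rfl
  | cons l t ih =>
    intro p
    simp only [chainDec, chainSafeDec, chainBothDec]
    by_cases h : l ≥ p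
    · have h1 : p - l < 1 := by omega
      simp [h, h1, show ¬ (1 : Int) ≤ p - l by omega]
    · have h1 : ¬ p - l < 1 := by omega
      by_cases h2 : p - l > 3
      · simp [h, h1, h2, show ¬ (p - l ≤ 3) by omega]
      · simp only [if_neg h, if_neg h1, if_neg h2]
        rw [ih l]
        have : ((1 : Int) ≤ p - l) = True := by simp; omega
        have h3 : ((p - l : Int) ≤ 3) = True := by simp; omega
        simp [this, h3]

-- chains as "all diffs in range"
theorem chainBothInc_eq_all (t : List Int) : ∀ p,
    chainBothInc p t = (pvDiffs (p :: t)).all (fun d => decide (1 ≤ d) && decide (d ≤ 3)) := by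
  induction t with
  | nil => intro p; rfl
  | cons l t ih =>
    intro p
    have hd : pvDiffs (p :: l :: t) = (l - p) :: pvDiffs (l :: t) := by simp [pvDiffs]
    simp only [chainBothInc, hd, List.all_cons, ih l]

theorem chainBothDec_eq_all (t : List Int) : ∀ p,
    chainBothDec p t = (pvDiffs (p :: t)).all (fun d => decide (-3 ≤ d) && decide (d ≤ -1)) := by
  induction t with
  | nil => intro p; rfl
  | cons l t ih =>
    intro p
    have hd : pvDiffs (p :: l :: t) = (l - p) :: pvDiffs (l :: t) := by simp [pvDiffs]
    have he : ∀ x : Int, ((1 ≤ p - x) && (p - x ≤ 3)) = (decide (-3 ≤ x - p) && decide (x - p ≤ -1)) := by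
      intro x
      by_cases h1 : (1:Int) ≤ p - x <;> by_cases h2 : p - x ≤ 3 <;>
        simp [h1, h2, show ((-3:Int) ≤ x - p) ↔ p - x ≤ 3 by omega,
          show (x - p ≤ (-1:Int)) ↔ 1 ≤ p - x by omega]
    simp only [chainBothDec, hd, List.all_cons, ih l, he l]

-- min/max extrema bounds
theorem foldl_min_ge (c : Int) (t : List Int) : ∀ h,
    (c ≤ t.foldl min h) ↔ (c ≤ h ∧ ∀ x ∈ t, c ≤ x) := by
  induction t with
  | nil => intro h; simp
  | cons l t ih =>
    intro h
    simp only [List.foldl_cons, ih (min h l), le_min_iff, List.mem_cons]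
    constructor
    · rintro ⟨⟨h1, h2⟩, h3⟩
      refine ⟨h1, fun x hx => ?_⟩
      rcases hx with rfl | hx
      exacts [h2, h3 x hx]
    · rintro ⟨h1, h2⟩
      exact ⟨⟨h1, h2 l (Or.inl rfl)⟩, fun x hx => h2 x (Or.inr hx)⟩

theorem foldl_max_le (c : Int) (t : List Int) : ∀ h,
    (t.foldl max h ≤ c) ↔ (h ≤ c ∧ ∀ x ∈ t, x ≤ c) := by
  induction t with
  | nil => intro h; simp
  | cons l t ih =>
    intro h
    simp only [List.foldl_cons, ih (max h l), max_le_iff, List.mem_cons]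
    constructor
    · rintro ⟨⟨h1, h2⟩, h3⟩
      refine ⟨h1, fun x hx => ?_⟩
      rcases hx with rfl | hx
      exacts [h2, h3 x hx]
    · rintro ⟨h1, h2⟩
      exact ⟨⟨h1, h2 l (Or.inl rfl)⟩, fun x hx => h2 x (Or.inr hx)⟩

theorem all_range_eq_minmax (a b d : Int) (ds : List Int) :
    ((d :: ds).all (fun x => decide (a ≤ x) && decide (x ≤ b)))
      = decide (a ≤ ds.foldl min d ∧ ds.foldl max d ≤ b) := by
  rw [Bool.eq_iff_iff]
  simp only [List.all_cons, List.all_eq_true, Bool.and_eq_true, decide_eq_true_eq]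
  rw [foldl_min_ge, foldl_max_le]
  constructor
  · rintro ⟨⟨h1, h2⟩, h3⟩
    exact ⟨⟨h1, fun x hx => (h3 x hx).1⟩, h2, fun x hx => (h3 x hx).2⟩
  · rintro ⟨⟨h1, h2⟩, h3, h4⟩
    exact ⟨⟨h1, h3⟩, fun x hx => ⟨h2 x hx, h4 x hx⟩⟩

-- A's per-report tests equal B's extrema classifiers
theorem safe_inc_eq (r : List Int) : is_safe_increasing r = condIncB r := by
  cases r with
  | nil => rfl
  | cons h t =>
    have hi : is_increasing (h :: t) = chainInc h t := by
      simpa using pvIncGo_concat t [] h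
    have hs : pvSafeIncGo [] (h :: t) = chainSafeInc h t := by
      simpa [pvSafeIncGo] using pvSafeIncGo_concat t [] h
    have hc : (chainInc h t && chainSafeInc h t) = condIncB (h :: t) := by
      rw [chain_both_inc, chainBothInc_eq_all]
      unfold condIncB
      cases hd : pvDiffs (h :: t) with
      | nil => simp
      | cons d ds => exact all_range_eq_minmax 1 3 d ds
    rw [← hc]
    simp only [is_safe_increasing, hi, hs]
    cases chainInc h t <;> simp

theorem safe_dec_eq (r : List Int) : is_safe_decreasing r = condDecB r := by
  cases r with
  | nil => rfl
  | cons h t =>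
    have hi : is_decreasing (h :: t) = chainDec h t := by
      simpa using pvDecGo_concat t [] h
    have hs : pvSafeDecGo [] (h :: t) = chainSafeDec h t := by
      simpa [pvSafeDecGo] using pvSafeDecGo_concat t [] h
    have hc : (chainDec h t && chainSafeDec h t) = condDecB (h :: t) := by
      rw [chain_both_dec, chainBothDec_eq_all]
      unfold condDecB
      cases hd : pvDiffs (h :: t) with
      | nil => simp
      | cons d ds => exact all_range_eq_minmax (-3) (-1) d ds
    rw [← hc]
    simp only [is_safe_decreasing, hi, hs]
    cases chainDec h t <;> simp

-- both folds compute (filter inc, filter dec)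
theorem gsr_foldA (reports : List (List Int)) : ∀ si sd,
    reports.foldl
      (fun (acc : List (List Int) × List (List Int)) report =>
        let acc := if is_safe_increasing report then (acc.1 ++ [report], acc.2) else acc
        if is_safe_decreasing report then (acc.1, acc.2 ++ [report]) else acc)
      (si, sd)
    = (si ++ reports.filter is_safe_increasing, sd ++ reports.filter is_safe_decreasing) := by
  induction reports with
  | nil => intro si sd; simp
  | cons r reports ih =>
    intro si sd
    simp only [List.foldl_cons, List.filter_cons]
    cases hI : is_safe_increasing r <;> cases hD : is_safe_decreasing r <;> simp [ih]

theorem gsr_foldB (reports : List (List Int)) : ∀ si sd,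
    reports.foldl
      (fun (acc : List (List Int) × List (List Int)) report =>
        match pvDiffs report with
        | [] => (acc.1 ++ [report], acc.2 ++ [report])
        | d :: ds =>
          let lo := ds.foldl min d
          let hi := ds.foldl max d
          let acc := if 1 ≤ lo ∧ hi ≤ 3 then (acc.1 ++ [report], acc.2) else acc
          if -3 ≤ lo ∧ hi ≤ -1 then (acc.1, acc.2 ++ [report]) else acc)
      (si, sd)
    = (si ++ reports.filter condIncB, sd ++ reports.filter condDecB) := by
  induction reports with
  | nil => intro si sd; simp
  | cons r reports ih =>
    intro si sd
    simp only [List.foldl_cons, List.filter_cons]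
    cases hd : pvDiffs r with
    | nil =>
      simp [hd, condIncB, condDecB, ih]
    | cons d ds =>
      have hI : condIncB r = decide (1 ≤ ds.foldl min d ∧ ds.foldl max d ≤ 3) := by
        unfold condIncB; rw [hd]
      have hD : condDecB r = decide (-3 ≤ ds.foldl min d ∧ ds.foldl max d ≤ -1) := by
        unfold condDecB; rw [hd]
      by_cases c1 : 1 ≤ ds.foldl min d ∧ ds.foldl max d ≤ 3 <;>
        by_cases c2 : -3 ≤ ds.foldl min d ∧ ds.foldl max d ≤ -1 <;>
          simp [hI, hD, c1, c2, ih]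

-- ===== VERDICT =====
theorem get_safe_reports_spec : Claim_equal_get_safe_reports := by
  intro reports _
  unfold Spec_get_safe_reports get_safe_reports get_safe_reports_alt
  rw [gsr_foldA reports [] [], gsr_foldB reports [] []]
  simp only [List.nil_append]
  rw [List.filter_congr (fun x _ => safe_inc_eq x), List.filter_congr (fun x _ => safe_dec_eq x)]
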